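-- pv_equiv track=rewrite | github.com/Punity122333/HypixelSkyBlockBot | database/bestiary.py | _calculate_bestiary_level
-- ===== SOURCE A (Python) =====
-- from typing import Dict, List, Optional, Any, Union
--
-- def _calculate_bestiary_level(kills: int, level_info: Optional[Dict[str, Any]]) -> int:
--     if not level_info:
--         if kills >= 5000:
--             return 9
--         elif kills >= 2500:
--             return 8
--         elif kills >= 1000:
--             return 7
--         elif kills >= 500:
--             return 6
--         elif kills >= 250:
--             return 5
--         elif kills >= 100:
--             return 4
--         elif kills >= 50:
--             return 3
--         elif kills >= 25:
--             return 2
--         elif kills >= 10: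
--             return 1
--         else:
--             return 0
--
--     max_level = level_info.get('max_level', 9)
--     for level in range(max_level, 0, -1):
--         required_kills = level_info.get(f'level_{level}_kills', 0)
--         if kills >= required_kills:
--             return level
--
--     return 0
-- ===== SOURCE B (Python) =====
-- _DEFAULT_THRESHOLDS = (10, 25, 50, 100, 250, 500, 1000, 2500, 5000)
--
-- def _calculate_bestiary_level(kills, level_info):
--     if level_info:
--         max_level = level_info.get('max_level', 9)
--         required = lambda lv: level_info.get(f'level_{lv}_kills', 0)
--     else:
--         max_level = 9
--         required = lambda lv: _DEFAULT_THRESHOLDS[lv - 1]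
--     best = 0
--     for level in range(1, max_level + 1):
--         if kills >= required(level):
--             best = level
--     return best
-- ===== Notes on version B (the rewrite author's own statement) =====
-- stated objective: alternative
-- what changed: Replaces A's descending early-return scan (plus a separate 10-way if/elif cascade for the default case) with a single ASCENDING loop 1..max_level keeping a 'best level reached' accumulator and never returning early; the default thresholds become an indexed tuple instead of the cascade; correct because the accumulator ends at the largest qualifying level, which is exactly the first hit of the descending scan.
import Mathlib
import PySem

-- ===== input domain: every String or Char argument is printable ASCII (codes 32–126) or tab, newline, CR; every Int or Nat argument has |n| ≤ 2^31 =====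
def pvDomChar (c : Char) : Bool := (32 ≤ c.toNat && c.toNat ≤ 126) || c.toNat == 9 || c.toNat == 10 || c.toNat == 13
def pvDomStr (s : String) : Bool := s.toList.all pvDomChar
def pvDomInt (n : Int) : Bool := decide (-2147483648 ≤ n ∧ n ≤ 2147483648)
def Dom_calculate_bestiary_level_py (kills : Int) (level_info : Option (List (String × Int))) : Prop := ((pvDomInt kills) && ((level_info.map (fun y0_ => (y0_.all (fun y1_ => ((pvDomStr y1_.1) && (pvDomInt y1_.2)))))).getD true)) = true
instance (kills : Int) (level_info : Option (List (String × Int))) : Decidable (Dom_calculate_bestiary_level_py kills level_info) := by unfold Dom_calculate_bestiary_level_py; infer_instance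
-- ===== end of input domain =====

-- B replaces A's descending early-return scan (and its separate if/elif cascade for the
-- default case) with one ascending accumulator loop over an indexed default table
-- (objective: alternative).

-- ===== PORT A =====
-- the 'for level in range(max_level, 0, -1): if kills >= …: return level' loop with its early return
def pvLoopA (kills : Int) (d : PySem.Dict String Int) : List Int → Int
  | [] => 0
  | level :: rest =>
      if kills ≥ PySem.Dict.getD d ("level_" ++ PySem.Int.toStr level ++ "_kills") 0 then level
      else pvLoopA kills d rest

def calculate_bestiary_level_py (kills : Int) (level_info : Option (List (String × Int))) : Int :=
  -- 'if not level_info': None or an empty dict is falsy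
  if (match level_info with | none => true | some l => l.isEmpty) then
    if kills ≥ 5000 then 9
    else if kills ≥ 2500 then 8
    else if kills ≥ 1000 then 7
    else if kills ≥ 500 then 6
    else if kills ≥ 250 then 5
    else if kills ≥ 100 then 4
    else if kills ≥ 50 then 3
    else if kills ≥ 25 then 2
    else if kills ≥ 10 then 1
    else 0
  else
    let d := PySem.Dict.mk (level_info.getD [])
    let max_level := PySem.Dict.getD d "max_level" 9
    pvLoopA kills d (PySem.List.pyRange max_level 0 (-1))

-- ===== PORT B =====
def pvDefaultThresholds : List Int := [10, 25, 50, 100, 250, 500, 1000, 2500, 5000]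

def calculate_bestiary_level_py_alt (kills : Int) (level_info : Option (List (String × Int))) : Int :=
  -- 'if level_info:' — truthy means some non-empty dict
  if (match level_info with | none => false | some l => !l.isEmpty) then
    let d := PySem.Dict.mk (level_info.getD [])
    let max_level := PySem.Dict.getD d "max_level" 9
    -- ascending loop with 'best' accumulator, no early return
    (PySem.List.pyRange 1 (max_level + 1) 1).foldl
      (fun best level =>
        if kills ≥ PySem.Dict.getD d ("level_" ++ PySem.Int.toStr level ++ "_kills") 0 then level else best) 0
  else
    -- 'required = lambda lv: _DEFAULT_THRESHOLDS[lv - 1]'; the index lv-1 is always in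
    -- range for lv in 1..9, so the pyGet?-none (IndexError) case is unreachable
    (PySem.List.pyRange 1 (9 + 1) 1).foldl
      (fun best level =>
        if kills ≥ (PySem.List.pyGet? pvDefaultThresholds (level - 1)).getD 0 then level else best) 0

-- ===== PRECONDITION & SPEC =====
def Spec_calculate_bestiary_level_py (kills : Int) (level_info : Option (List (String × Int))) (out : Int) : Prop := out = calculate_bestiary_level_py_alt kills level_info
instance (kills : Int) (level_info : Option (List (String × Int))) (out : Int) : Decidable (Spec_calculate_bestiary_level_py kills level_info out) := by unfold Spec_calculate_bestiary_level_py; infer_instance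

-- ===== CLAIM (what is proved, stated in full; the proofs are below) =====
def Claim_equal_calculate_bestiary_level_py : Prop := ∀ (kills : Int) (level_info : Option (List (String × Int))), Dom_calculate_bestiary_level_py kills level_info → Spec_calculate_bestiary_level_py kills level_info (calculate_bestiary_level_py kills level_info)

-- ===== LEMMAS AND PROOFS =====

-- A's descending early-return scan equals B's ascending accumulator fold, for any
-- kill-count and thresholds dict: by induction on the top level k
theorem pvScan_eq (kills : Int) (d : PySem.Dict String Int) (k : Nat) :
    pvLoopA kills d (PySem.List.pyRange (k : Int) 0 (-1))
      = (PySem.List.pyRange 1 ((k : Int) + 1) 1).foldl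
          (fun best level =>
            if kills ≥ PySem.Dict.getD d ("level_" ++ PySem.Int.toStr level ++ "_kills") 0 then level else best) 0 := by
  induction k with
  | zero =>
      rw [PySem.List.pyRange_neg_one_eq_nil (by norm_num),
          PySem.List.pyRange_one_eq_nil (by norm_num)]
      rfl
  | succ k ih =>
      rw [PySem.List.pyRange_neg_one_cons (by omega),
          show ((k + 1 : Nat) : Int) + 1 = ((k : Int) + 1) + 1 by push_cast; ring,
          PySem.List.pyRange_one_succ_right (by omega),
          List.foldl_append]
      simp only [List.foldl_cons, List.foldl_nil, pvLoopA]
      rw [show ((k + 1 : Nat) : Int) - 1 = (k : Int) by push_cast; ring, ih]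
      by_cases h : kills ≥ PySem.Dict.getD d ("level_" ++ PySem.Int.toStr ((k:Int)+1) ++ "_kills") 0 <;>
        simp [h]

-- in the falsy case, B's ascending fold over the default table literally rebuilds A's cascade
theorem pvDefault_scan (kills : Int) :
    (if kills ≥ 5000 then (9:Int)
     else if kills ≥ 2500 then 8
     else if kills ≥ 1000 then 7
     else if kills ≥ 500 then 6
     else if kills ≥ 250 then 5
     else if kills ≥ 100 then 4
     else if kills ≥ 50 then 3
     else if kills ≥ 25 then 2
     else if kills ≥ 10 then 1
     else 0)
    = (PySem.List.pyRange 1 (9 + 1) 1).foldl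
        (fun best level =>
          if kills ≥ (PySem.List.pyGet? pvDefaultThresholds (level - 1)).getD 0 then level else best) 0 := by
  rw [show PySem.List.pyRange 1 (9 + 1) 1 = [1,2,3,4,5,6,7,8,9] from by decide]
  simp only [List.foldl_cons, List.foldl_nil]
  rw [show (PySem.List.pyGet? pvDefaultThresholds ((1:Int) - 1)).getD 0 = 10 from by decide,
      show (PySem.List.pyGet? pvDefaultThresholds ((2:Int) - 1)).getD 0 = 25 from by decide,
      show (PySem.List.pyGet? pvDefaultThresholds ((3:Int) - 1)).getD 0 = 50 from by decide,
      show (PySem.List.pyGet? pvDefaultThresholds ((4:Int) - 1)).getD 0 = 100 from by decide,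
      show (PySem.List.pyGet? pvDefaultThresholds ((5:Int) - 1)).getD 0 = 250 from by decide,
      show (PySem.List.pyGet? pvDefaultThresholds ((6:Int) - 1)).getD 0 = 500 from by decide,
      show (PySem.List.pyGet? pvDefaultThresholds ((7:Int) - 1)).getD 0 = 1000 from by decide,
      show (PySem.List.pyGet? pvDefaultThresholds ((8:Int) - 1)).getD 0 = 2500 from by decide,
      show (PySem.List.pyGet? pvDefaultThresholds ((9:Int) - 1)).getD 0 = 5000 from by decide]

-- ===== VERDICT (by name: the statement is the Claim_ definition above) =====
theorem calculate_bestiary_level_py_spec : Claim_equal_calculate_bestiary_level_py := by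
  intro kills level_info _
  unfold Spec_calculate_bestiary_level_py calculate_bestiary_level_py calculate_bestiary_level_py_alt
  match level_info with
  | none => simpa using pvDefault_scan kills
  | some l =>
      by_cases h : l.isEmpty
      · simpa [h] using pvDefault_scan kills
      · simp only [h, Bool.false_eq_true, if_false, Bool.not_false, if_true, Option.getD_some]
        set m := PySem.Dict.getD (PySem.Dict.mk l) "max_level" 9 with hm
        by_cases hpos : 0 < m
        · obtain ⟨k, hk⟩ : ∃ k : Nat, m = (k : Int) := ⟨m.toNat, (Int.toNat_of_nonneg hpos.le).symm⟩
          rw [hk]; exact pvScan_eq kills (PySem.Dict.mk l) k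
        · rw [PySem.List.pyRange_neg_one_eq_nil (by omega),
              PySem.List.pyRange_one_eq_nil (by omega)]
          rfl
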